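-- pv_equiv track=rewrite | github.com/VASABIcz/simple-math-eval | main.py | find_lowest_val
-- ===== SOURCE A (Python) =====
-- LOW = ('+', '-')
--
-- HIGH = ('*', '/')
--
-- def better_bracket(exp: str) -> (int, int):
--     openn = None
--     ignore = 0
--
--     for n, c in enumerate(exp):
--         if c == '(':
--             if openn is None:
--                 openn = n
--             else:
--                 ignore += 1
--         elif c == ')':
--             if ignore == 0:
--                 closee = n
--                 return openn, closee
--             else:
--                 ignore -= 1
--     else:
--         raise ValueError
--
-- def find_lowest_val(exp: str) -> None or int:
--     copy = exp
--     first_high = None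
--
--     while '(' in copy:
--         op, clo = better_bracket(copy)
--         for x in range(op, clo):
--             copy = copy[:op] + "x" * ((clo + 1) - op) + copy[clo + 1:]
--
--     for n, c in enumerate(copy):
--         if c in LOW:
--             return n
--         elif c in HIGH:
--             if first_high is None:
--                 first_high = n
--
--     if first_high is not None:
--         return first_high
--
--     return None
-- ===== SOURCE B (Python) =====
-- LOW = ('+', '-')
--
-- HIGH = ('*', '/')
--
-- def find_lowest_val(exp: str) -> None or int:
--     depth = 0
--     first_high = None
--     for n, c in enumerate(exp):
--         if c == '(':
--             depth += 1
--         elif c == ')':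
--             if depth:
--                 depth -= 1
--         elif depth == 0:
--             if c in LOW:
--                 return n
--             if c in HIGH and first_high is None:
--                 first_high = n
--     return first_high
-- ===== Notes on version B (the rewrite author's own statement) =====
-- stated objective: simpler
-- what changed: B replaces A's repeated bracket-search-and-string-rebuild masking loop (helper better_bracket plus a rebuild loop plus a final scan) by one single pass that tracks bracket depth (floored at 0) and reports the first depth-0 LOW operator, else the first depth-0 HIGH operator.
import Mathlib
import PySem

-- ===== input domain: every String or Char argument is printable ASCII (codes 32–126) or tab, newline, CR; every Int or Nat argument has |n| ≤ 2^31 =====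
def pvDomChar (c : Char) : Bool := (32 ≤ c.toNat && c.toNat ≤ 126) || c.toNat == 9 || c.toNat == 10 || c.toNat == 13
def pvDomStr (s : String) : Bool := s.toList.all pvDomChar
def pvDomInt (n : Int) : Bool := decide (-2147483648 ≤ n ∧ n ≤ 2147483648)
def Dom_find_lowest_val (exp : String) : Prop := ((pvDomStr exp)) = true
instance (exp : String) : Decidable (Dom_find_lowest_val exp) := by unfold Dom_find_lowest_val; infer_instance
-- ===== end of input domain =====

-- B replaces A's repeated bracket-masking string rebuilds by one depth-tracking pass (simpler; no speed claim).

-- ===== PORT A =====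
def pvLOW : List Char := ['+', '-']
def pvHIGH : List Char := ['*', '/']

-- better_bracket's enumerate loop: n is the running index, openn/ignore the loop state;
-- returns none where Python raises ValueError (loop ends without returning).
def bbAux : List Char → Nat → Option Nat → Nat → Option (Option Nat × Nat)
  | [], _, _, _ => none
  | c :: cs, n, openn, ignore =>
    if c = '(' then
      match openn with
      | none => bbAux cs (n + 1) (some n) ignore
      | some o => bbAux cs (n + 1) (some o) (ignore + 1)
    else if c = ')' then
      if ignore = 0 then some (openn, n)
      else bbAux cs (n + 1) openn (ignore - 1)
    else bbAux cs (n + 1) openn ignore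

-- copy[:op] + "x" * ((clo + 1) - op) + copy[clo + 1:]
def maskOnce (op clo : Nat) (c : List Char) : List Char :=
  c.take op ++ List.replicate (clo + 1 - op) 'x' ++ c.drop (clo + 1)

-- Termination helpers for the while loop (cited by maskLoop's decreasing_by).
theorem bb_some_bounds : ∀ (l : List Char) (n o ig : Nat) (op : Option Nat) (clo : Nat),
    bbAux l n (some o) ig = some (op, clo) → op = some o ∧ n ≤ clo ∧ clo - n < l.length := by
  intro l
  induction l with
  | nil => intro n o ig op clo h; simp [bbAux] at h
  | cons c cs ih =>
    intro n o ig op clo h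
    simp only [bbAux] at h
    by_cases hc : c = '('
    · simp only [if_pos hc] at h
      obtain ⟨h1, h2, h3⟩ := ih (n+1) o (ig+1) op clo h
      exact ⟨h1, by omega, by simp; omega⟩
    · simp only [if_neg hc] at h
      by_cases hc2 : c = ')'
      · simp only [if_pos hc2] at h
        by_cases hig : ig = 0
        · simp only [if_pos hig] at h
          obtain ⟨h1, h2⟩ := Prod.mk.injEq .. ▸ (Option.some.injEq .. ▸ h)
          exact ⟨h1.symm, by omega, by simp; omega⟩
        · simp only [if_neg hig] at h
          obtain ⟨h1, h2, h3⟩ := ih (n+1) o (ig-1) op clo h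
          exact ⟨h1, by omega, by simp; omega⟩
      · simp only [if_neg hc2] at h
        obtain ⟨h1, h2, h3⟩ := ih (n+1) o ig op clo h
        exact ⟨h1, by omega, by simp; omega⟩

theorem bb_first : ∀ (l : List Char) (n ig op clo : Nat),
    bbAux l n none ig = some (some op, clo) →
    n ≤ op ∧ op - n < l.length ∧ l[op - n]? = some '(' ∧ op < clo ∧ clo - n < l.length := by
  intro l
  induction l with
  | nil => intro n ig op clo h; simp [bbAux] at h
  | cons c cs ih =>
    intro n ig op clo h
    simp only [bbAux] at h
    by_cases hc : c = '('
    · simp only [if_pos hc] at h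
      obtain ⟨h1, h2, h3⟩ := bb_some_bounds cs (n+1) n ig (some op) clo h
      have hop : op = n := by injection h1 with h1
      subst hop
      refine ⟨le_rfl, by simp, by simp [hc], by omega, ?_⟩
      simp only [List.length_cons]; omega
    · simp only [if_neg hc] at h
      by_cases hc2 : c = ')'
      · simp only [if_pos hc2] at h
        by_cases hig : ig = 0
        · simp only [if_pos hig] at h
          simp at h
        · simp only [if_neg hig] at h
          obtain ⟨h1, h2, h3, h4, h5⟩ := ih (n+1) (ig-1) op clo h
          refine ⟨by omega, by simp; omega, ?_, h4, by simp; omega⟩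
          have : op - n = (op - (n+1)) + 1 := by omega
          rw [this]
          simpa using h3
      · simp only [if_neg hc2] at h
        obtain ⟨h1, h2, h3, h4, h5⟩ := ih (n+1) ig op clo h
        refine ⟨by omega, by simp; omega, ?_, h4, by simp; omega⟩
        have : op - n = (op - (n+1)) + 1 := by omega
        rw [this]
        simpa using h3

theorem foldl_apply_fix {α β : Type} (f : α → α) (d : α) (hd : f d = d) :
    ∀ (xs : List β), xs.foldl (fun acc _ => f acc) d = d := by
  intro xs
  induction xs with
  | nil => rfl
  | cons x xs ih => simp [List.foldl, hd, ih]

theorem foldl_apply_idem {α β : Type} (f : α → α) (c : α) (hf : f (f c) = f c) :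
    ∀ (x : β) (xs : List β), (x :: xs).foldl (fun acc _ => f acc) c = f c := by
  intro x xs
  simp only [List.foldl]
  exact foldl_apply_fix f (f c) hf xs

theorem maskOnce_idem (op clo : Nat) (c : List Char) (hop : op ≤ c.length)
    (hoc : op ≤ clo) (hclo : clo + 1 ≤ c.length) : maskOnce op clo (maskOnce op clo c) = maskOnce op clo c := by
  have hlen1 : (c.take op).length = op := by
    rw [List.length_take]; omega
  have hlen2 : (c.take op ++ List.replicate (clo + 1 - op) 'x').length = clo + 1 := by
    rw [List.length_append, List.length_take, List.length_replicate]; omega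
  have e1 : (maskOnce op clo c).take op = c.take op := by
    unfold maskOnce
    rw [List.take_append, List.take_append, hlen1]
    rw [List.take_of_length_le (le_of_eq hlen1), hlen2]
    simp [Nat.sub_eq_zero_of_le (by omega : op ≤ clo + 1)]
  have e2 : (maskOnce op clo c).drop (clo + 1) = c.drop (clo + 1) := by
    unfold maskOnce
    rw [List.drop_append, List.drop_append, hlen1]
    rw [hlen2]
    simp
    exact Or.inl (by omega)
  calc maskOnce op clo (maskOnce op clo c)
      = (maskOnce op clo c).take op ++ List.replicate (clo + 1 - op) 'x' ++
          (maskOnce op clo c).drop (clo + 1) := rfl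
    _ = maskOnce op clo c := by rw [e1, e2]; rfl

theorem mask_count_lt (l : List Char) (op clo : Nat) (h1 : op < l.length)
    (h2 : l[op]? = some '(') (h3 : op < clo) :
    (maskOnce op clo l).count '(' < l.count '(' := by
  unfold maskOnce
  have hx : (List.replicate (clo + 1 - op) 'x').count '(' = 0 := by
    simp [List.count_replicate]
  have hsplit : l.count '(' = (l.take op).count '(' + (l.drop op).count '(' := by
    conv_lhs => rw [← List.take_append_drop op l]
    rw [List.count_append]
  have hdrop : l.drop op = '(' :: l.drop (op + 1) := by
    rw [List.drop_eq_getElem_cons h1]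
    congr 1
    have := List.getElem?_eq_getElem h1
    rw [this] at h2; injection h2
  have hsub : (l.drop (clo + 1)).count '(' ≤ (l.drop (op + 1)).count '(' := by
    have : l.drop (clo + 1) = (l.drop (op + 1)).drop (clo - op) := by
      rw [List.drop_drop]; congr 1; omega
    rw [this]
    exact (List.drop_sublist _ _).count_le _
  simp only [List.count_append, hx]
  rw [hsplit, hdrop]
  simp [List.count_cons]
  omega

-- the while '(' in copy loop of find_lowest_val (none = Python raised inside it)
def maskLoop (copy : List Char) : Option (List Char) :=
  if h : '(' ∈ copy then
    match hb : bbAux copy 0 none 0 with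
    | none => none                 -- better_bracket raised ValueError
    | some (none, _) => none       -- op is None: range(None, clo) raises TypeError
    | some (some op, clo) =>
        -- for x in range(op, clo): copy = copy[:op] + "x"*((clo+1)-op) + copy[clo+1:]
        maskLoop ((PySem.List.pyRange (op : Int) (clo : Int)).foldl
          (fun acc _ => maskOnce op clo acc) copy)
  else some copy
termination_by copy.count '('
decreasing_by
  obtain ⟨hno, hlt, hget, hoc, hcl⟩ := bb_first copy 0 0 op clo hb
  simp only [Nat.sub_zero] at hlt hget hcl
  have hidem : maskOnce op clo (maskOnce op clo copy) = maskOnce op clo copy :=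
    maskOnce_idem op clo copy (le_of_lt hlt) (by omega) (by omega)
  have hne : PySem.List.pyRange (op : Int) (clo : Int) =
      (op : Int) :: PySem.List.pyRange ((op : Int) + 1) (clo : Int) :=
    PySem.List.pyRange_one_cons (by exact_mod_cast hoc)
  rw [hne, foldl_apply_idem _ _ hidem]
  exact mask_count_lt copy op clo hlt hget hoc

-- the final for n, c in enumerate(copy) scan
def scanAux : List Char → Nat → Option Int → Option Int
  | [], _, fh => fh
  | c :: cs, n, fh =>
    if c ∈ pvLOW then some (n : Int)
    else if c ∈ pvHIGH then
      scanAux cs (n + 1) (match fh with | none => some (n : Int) | some v => some v)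
    else scanAux cs (n + 1) fh

def find_lowest_val (exp : String) : Option Int :=
  match maskLoop exp.toList with
  | none => none                  -- A raises here; excluded by Pre_
  | some copy => scanAux copy 0 none

-- ===== PORT B =====
def altAux : List Char → Nat → Nat → Option Int → Option Int
  | [], _, _, fh => fh
  | c :: cs, n, d, fh =>
    if c = '(' then altAux cs (n + 1) (d + 1) fh
    else if c = ')' then altAux cs (n + 1) (d - 1) fh  -- Nat subtraction = B's guarded decrement
    else if d = 0 then
      if c ∈ pvLOW then some (n : Int)
      else if c ∈ pvHIGH then
        altAux cs (n + 1) d (match fh with | none => some (n : Int) | some v => some v)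
      else altAux cs (n + 1) d fh
    else altAux cs (n + 1) d fh

def find_lowest_val_alt (exp : String) : Option Int := altAux exp.toList 0 0 none

-- ===== PRECONDITION & SPEC =====
-- Pre_ excludes exactly the inputs on which A raises: a '(' preceded by more ')' than '('
-- (a stray depth-0 ')' before it), or a '(' with no balanced closing ')' after it.
def Pre_find_lowest_val (exp : String) : Prop :=
  (∀ j < exp.toList.length, exp.toList[j]? = some '(' →
      (exp.toList.take j).count ')' ≤ (exp.toList.take j).count '(') ∧
  (∀ j < exp.toList.length, exp.toList[j]? = some '(' →
      ∃ k < exp.toList.length, j < k ∧ exp.toList[k]? = some ')' ∧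
        ((exp.toList.drop (j + 1)).take (k - (j + 1))).count '(' =
          ((exp.toList.drop (j + 1)).take (k - (j + 1))).count ')')
instance (exp : String) : Decidable (Pre_find_lowest_val exp) := by
  unfold Pre_find_lowest_val; infer_instance

def pvWitness_find_lowest_val : String := "(1+2)*3"

def Spec_find_lowest_val (exp : String) (out : Option Int) : Prop := out = find_lowest_val_alt exp
instance (exp : String) (out : Option Int) : Decidable (Spec_find_lowest_val exp out) := by
  unfold Spec_find_lowest_val; infer_instance

-- ===== CLAIM (what is proved, stated in full; the proofs are below) =====
def Claim_equal_find_lowest_val : Prop := ∀ (exp : String), Dom_find_lowest_val exp →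
  Pre_find_lowest_val exp → Spec_find_lowest_val exp (find_lowest_val exp)

-- ===== LEMMAS AND PROOFS =====

-- bbAux with openn = some o, given a balanced-closing witness, returns that first balanced ')'
theorem bb_inner : ∀ (l : List Char) (n o ig : Nat),
    (∃ k, k < l.length ∧ l[k]? = some ')' ∧ ig + (l.take k).count '(' = (l.take k).count ')') →
    ∃ mid suf, l = mid ++ ')' :: suf ∧ ig + mid.count '(' = mid.count ')' ∧
      (∀ t ≤ mid.length, (mid.take t).count ')' ≤ ig + (mid.take t).count '(') ∧
      bbAux l n (some o) ig = some (some o, n + mid.length) := by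

  intro l
  induction l with
  | nil => rintro n o ig ⟨k, hk, _⟩; simp at hk
  | cons c cs ih =>
    rintro n o ig ⟨k, hk, hkc, hcnt⟩
    by_cases hc : c = '('
    · have hk1 : k ≠ 0 := by rintro rfl; rw [hc] at hkc; simp at hkc
      obtain ⟨k', rfl⟩ : ∃ k', k = k' + 1 := ⟨k - 1, by omega⟩
      have hkc' : cs[k']? = some ')' := by simpa using hkc
      have hcnt' : (ig + 1) + (cs.take k').count '(' = (cs.take k').count ')' := by
        rw [List.take_succ_cons] at hcnt
        simp [List.count_cons, hc] at hcnt
        omega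
      obtain ⟨mid, suf, heq, hbal, hpre, hbb⟩ :=
        ih (n + 1) o (ig + 1) ⟨k', by simpa using hk, hkc', hcnt'⟩
      refine ⟨c :: mid, suf, by rw [heq]; rfl, ?_, ?_, ?_⟩
      · simp [List.count_cons, hc]; omega
      · intro t ht
        match t with
        | 0 => simp
        | t + 1 =>
          rw [List.take_succ_cons]
          simp only [List.count_cons, hc]
          have := hpre t (by simpa using ht)
          simp
          omega
      · simp only [bbAux, if_pos hc]
        rw [hbb]
        simp
        omega
    · by_cases hc2 : c = ')'
      · by_cases hig : ig = 0
        · refine ⟨[], cs, by simp [hc2], by simp [hig], by intro t ht; simp at ht; simp [ht], ?_⟩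
          simp [bbAux, hc, hc2, hig]
        · have hk1 : k ≠ 0 := by
            rintro rfl; simp at hcnt; omega
          obtain ⟨k', rfl⟩ : ∃ k', k = k' + 1 := ⟨k - 1, by omega⟩
          have hkc' : cs[k']? = some ')' := by simpa using hkc
          have hcnt' : (ig - 1) + (cs.take k').count '(' = (cs.take k').count ')' := by
            rw [List.take_succ_cons] at hcnt
            simp [List.count_cons, hc2] at hcnt
            omega
          obtain ⟨mid, suf, heq, hbal, hpre, hbb⟩ :=
            ih (n + 1) o (ig - 1) ⟨k', by simpa using hk, hkc', hcnt'⟩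
          refine ⟨c :: mid, suf, by rw [heq]; rfl, ?_, ?_, ?_⟩
          · simp [List.count_cons, hc2, hc]; omega
          · intro t ht
            match t with
            | 0 => simp
            | t + 1 =>
              rw [List.take_succ_cons]
              simp only [List.count_cons, hc2]
              have := hpre t (by simpa using ht)
              simp [hc]
              omega
          · simp only [bbAux, if_neg hc, if_pos hc2, if_neg hig]
            rw [hbb]
            simp
            omega
      · have hk1 : k ≠ 0 := by rintro rfl; simp at hkc; exact hc2 hkc
        obtain ⟨k', rfl⟩ : ∃ k', k = k' + 1 := ⟨k - 1, by omega⟩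
        have hkc' : cs[k']? = some ')' := by simpa using hkc
        have hcnt' : ig + (cs.take k').count '(' = (cs.take k').count ')' := by
          rw [List.take_succ_cons] at hcnt
          simp [List.count_cons, hc, hc2] at hcnt
          omega
        obtain ⟨mid, suf, heq, hbal, hpre, hbb⟩ :=
          ih (n + 1) o ig ⟨k', by simpa using hk, hkc', hcnt'⟩
        refine ⟨c :: mid, suf, by rw [heq]; rfl, ?_, ?_, ?_⟩
        · simp [List.count_cons, hc, hc2]; omega
        · intro t ht
          match t with
          | 0 => simp
          | t + 1 =>
            rw [List.take_succ_cons]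
            simp only [List.count_cons]
            have := hpre t (by simpa using ht)
            simp [hc, hc2]
            omega
        · simp only [bbAux, if_neg hc, if_neg hc2]
          rw [hbb]
          simp
          omega

theorem first_open : ∀ (l : List Char), '(' ∈ l →
    ∃ j, j < l.length ∧ l[j]? = some '(' ∧ (l.take j).count '(' = 0 := by

  intro l
  induction l with
  | nil => intro h; simp at h
  | cons c cs ih =>
    intro h
    by_cases hc : c = '('
    · exact ⟨0, by simp, by simp [hc], by simp⟩
    · have : '(' ∈ cs := by
        rcases List.mem_cons.mp h with h1 | h1
        · exact absurd h1.symm hc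
        · exact h1
      obtain ⟨j, hj, hjc, hjz⟩ := ih this
      refine ⟨j + 1, by simpa using hj, by simpa using hjc, ?_⟩
      rw [List.take_succ_cons]
      simp [List.count_cons, hc, hjz]

theorem bb_none : ∀ (l : List Char) (n : Nat), '(' ∈ l →
    (∀ j < l.length, l[j]? = some '(' → (l.take j).count ')' ≤ (l.take j).count '(') →
    (∀ j < l.length, l[j]? = some '(' →
      ∃ k < l.length, j < k ∧ l[k]? = some ')' ∧
        ((l.drop (j + 1)).take (k - (j + 1))).count '(' =
          ((l.drop (j + 1)).take (k - (j + 1))).count ')') →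
    ∃ pre mid suf, l = pre ++ '(' :: (mid ++ ')' :: suf) ∧
      pre.count '(' = 0 ∧ pre.count ')' = 0 ∧
      mid.count '(' = mid.count ')' ∧
      (∀ t ≤ mid.length, (mid.take t).count ')' ≤ (mid.take t).count '(') ∧
      bbAux l n none 0 = some (some (n + pre.length), n + pre.length + 1 + mid.length) := by

  intro l
  induction l with
  | nil => intro n h; simp at h
  | cons c cs ih =>
    intro n hmem h1 h2
    by_cases hc : c = '('
    · obtain ⟨k, hk, hkgt, hkc, hksl⟩ := h2 0 (by simp) (by simp [hc])
      obtain ⟨k', rfl⟩ : ∃ k', k = k' + 1 := ⟨k - 1, by omega⟩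
      have hw : ∃ k2, k2 < cs.length ∧ cs[k2]? = some ')' ∧
          0 + (cs.take k2).count '(' = (cs.take k2).count ')' := by
        refine ⟨k', by simpa using hk, by simpa using hkc, ?_⟩
        have hd : (c :: cs).drop (0 + 1) = cs := by simp
        rw [hd] at hksl
        have he : k' + 1 - (0 + 1) = k' := by omega
        rw [he] at hksl
        omega
      obtain ⟨mid, suf, heq, hbal, hpre, hbb⟩ := bb_inner cs (n + 1) n 0 hw
      refine ⟨[], mid, suf, by rw [hc, heq]; rfl, by simp, by simp, by simpa using hbal,
        by simpa using hpre, ?_⟩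
      simp only [bbAux, if_pos hc]
      rw [hbb]
      simp
    · by_cases hc2 : c = ')'
      · exfalso
        obtain ⟨j, hj, hjc, hjz⟩ := first_open _ hmem
        have hj1 : j ≠ 0 := by
          rintro rfl; simp at hjc; exact hc (hjc.symm ▸ rfl)
        have := h1 j hj hjc
        obtain ⟨j', rfl⟩ : ∃ j', j = j' + 1 := ⟨j - 1, by omega⟩
        rw [List.take_succ_cons] at this hjz
        simp [List.count_cons, hc2, hc] at this hjz
        omega
      · have hmem' : '(' ∈ cs := by
          rcases List.mem_cons.mp hmem with h | h
          · exact absurd h.symm hc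
          · exact h
        have h1' : ∀ j < cs.length, cs[j]? = some '(' →
            (cs.take j).count ')' ≤ (cs.take j).count '(' := by
          intro j hj hjc
          have := h1 (j + 1) (by simpa using hj) (by simpa using hjc)
          rw [List.take_succ_cons] at this
          simp [List.count_cons, hc, hc2] at this
          omega
        have h2' : ∀ j < cs.length, cs[j]? = some '(' →
            ∃ k < cs.length, j < k ∧ cs[k]? = some ')' ∧
              ((cs.drop (j + 1)).take (k - (j + 1))).count '(' =
                ((cs.drop (j + 1)).take (k - (j + 1))).count ')' := by
          intro j hj hjc
          obtain ⟨k, hk, hkgt, hkc, hksl⟩ := h2 (j + 1) (by simpa using hj) (by simpa using hjc)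
          obtain ⟨k', rfl⟩ : ∃ k', k = k' + 1 := ⟨k - 1, by omega⟩
          refine ⟨k', by simpa using hk, by omega, by simpa using hkc, ?_⟩
          have hd : (c :: cs).drop (j + 1 + 1) = cs.drop (j + 1) := by simp
          rw [hd] at hksl
          have harith : k' + 1 - (j + 1 + 1) = k' - (j + 1) := by omega
          rw [harith] at hksl
          exact hksl
        obtain ⟨pre, mid, suf, heq, hp1, hp2, hbal, hpre, hbb⟩ := ih (n + 1) hmem' h1' h2'
        refine ⟨c :: pre, mid, suf, by rw [heq]; rfl, ?_, ?_, hbal, hpre, ?_⟩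
        · simp [List.count_cons, hc, hp1]
        · simp [List.count_cons, hc2, hp2]
        · simp only [bbAux, if_neg hc, if_neg hc2]
          rw [hbb]
          simp
          omega

theorem alt_scan : ∀ (l : List Char), '(' ∉ l → ∀ (n : Nat) (fh : Option Int),
    altAux l n 0 fh = scanAux l n fh := by

  intro l
  induction l with
  | nil => intro _ n fh; rfl
  | cons c cs ih =>
    intro hmem n fh
    have hc : ¬ c = '(' := fun h => hmem (h ▸ List.mem_cons_self ..)
    have hmem' : '(' ∉ cs := fun h => hmem (List.mem_cons_of_mem _ h)
    by_cases hc2 : c = ')'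
    · have h1 : c ∉ pvLOW := by rw [hc2]; decide
      have h2 : c ∉ pvHIGH := by rw [hc2]; decide
      simp only [altAux, scanAux, if_neg hc, if_pos hc2, if_neg h1, if_neg h2]
      exact ih hmem' (n + 1) fh
    · by_cases h1 : c ∈ pvLOW
      · simp [altAux, scanAux, hc, hc2, h1]
      · by_cases h2 : c ∈ pvHIGH
        · simp only [altAux, scanAux, if_neg hc, if_neg hc2, if_neg h1, if_pos h2, if_pos rfl]
          exact ih hmem' (n + 1) _
        · simp only [altAux, scanAux, if_neg hc, if_neg hc2, if_neg h1, if_neg h2, if_pos rfl]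
          exact ih hmem' (n + 1) fh

theorem alt_skip_depth : ∀ (mid suf : List Char) (n d : Nat) (fh : Option Int),
    (∀ t ≤ mid.length, (mid.take t).count ')' + 1 ≤ d + (mid.take t).count '(') →
    altAux (mid ++ suf) n d fh = altAux suf (n + mid.length) (d + mid.count '(' - mid.count ')') fh := by

  intro mid
  induction mid with
  | nil => intro suf n d fh _; simp
  | cons c cs ih =>
    intro suf n d fh hp
    have h1 := hp 1 (by simp)
    by_cases hc : c = '('
    · simp only [List.cons_append, altAux, if_pos hc]
      rw [ih suf (n + 1) (d + 1) fh ?side]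
      case side =>
        intro t ht
        have := hp (t + 1) (by simpa using ht)
        rw [List.take_succ_cons] at this
        simp [List.count_cons, hc] at this ⊢
        omega
      have e1 : n + 1 + cs.length = n + (c :: cs).length := by
        rw [List.length_cons]; omega
      have e2 : d + 1 + cs.count '(' - cs.count ')' =
          d + (c :: cs).count '(' - (c :: cs).count ')' := by
        rw [hc]; simp [List.count_cons]; omega
      rw [e1, e2]
    · by_cases hc2 : c = ')'
      · have hd2 : 2 ≤ d := by
          rw [List.take_succ_cons, List.take_zero] at h1
          simp [List.count_cons, hc2, hc] at h1
          omega
        simp only [List.cons_append, altAux, if_neg hc, if_pos hc2]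
        rw [ih suf (n + 1) (d - 1) fh ?side2]
        case side2 =>
          intro t ht
          have := hp (t + 1) (by simpa using ht)
          rw [List.take_succ_cons] at this
          simp [List.count_cons, hc2] at this ⊢
          omega
        have e1 : n + 1 + cs.length = n + (c :: cs).length := by
          rw [List.length_cons]; omega
        have e2 : d - 1 + cs.count '(' - cs.count ')' =
            d + (c :: cs).count '(' - (c :: cs).count ')' := by
          rw [hc2]; simp [List.count_cons, show ¬(')' : Char) = '(' by decide]
          omega
        rw [e1, e2]
      · have hd1 : 1 ≤ d := by
          rw [List.take_succ_cons, List.take_zero] at h1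
          simp [List.count_cons, hc, hc2] at h1
          omega
        have hdne : ¬ d = 0 := by omega
        simp only [List.cons_append, altAux, if_neg hc, if_neg hc2, if_neg hdne]
        rw [ih suf (n + 1) d fh ?side3]
        case side3 =>
          intro t ht
          have := hp (t + 1) (by simpa using ht)
          rw [List.take_succ_cons] at this
          simp [List.count_cons, hc, hc2] at this ⊢
          omega
        have e1 : n + 1 + cs.length = n + (c :: cs).length := by
          rw [List.length_cons]; omega
        have e2 : d + cs.count '(' - cs.count ')' =
            d + (c :: cs).count '(' - (c :: cs).count ')' := by
          simp [List.count_cons, hc, hc2]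
        rw [e1, e2]

theorem alt_skip_x : ∀ (k : Nat) (suf : List Char) (n : Nat) (fh : Option Int),
    altAux (List.replicate k 'x' ++ suf) n 0 fh = altAux suf (n + k) 0 fh := by

  intro k
  induction k with
  | zero => intro suf n fh; simp
  | succ k ih =>
    intro suf n fh
    rw [List.replicate_succ]
    simp only [List.cons_append, altAux]
    rw [if_neg (by decide : ¬('x' : Char) = '('), if_neg (by decide : ¬('x' : Char) = ')')]
    rw [if_pos trivial, if_neg (by decide : ('x' : Char) ∉ pvLOW),
      if_neg (by decide : ('x' : Char) ∉ pvHIGH)]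
    rw [ih suf (n + 1) fh]
    have : n + 1 + k = n + (k + 1) := by omega
    rw [this]

theorem alt_pre_cong : ∀ (p l l' : List Char), p.count '(' = 0 → p.count ')' = 0 →
    (∀ (n : Nat) (fh : Option Int), altAux l n 0 fh = altAux l' n 0 fh) →
    ∀ (n : Nat) (fh : Option Int), altAux (p ++ l) n 0 fh = altAux (p ++ l') n 0 fh := by

  intro p
  induction p with
  | nil => intro l l' _ _ h n fh; exact h n fh
  | cons c cs ih =>
    intro l l' hp1 hp2 h n fh
    have hc : ¬ c = '(' := by
      intro hc; rw [hc] at hp1; simp [List.count_cons] at hp1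
    have hc2 : ¬ c = ')' := by
      intro hc; rw [hc] at hp2; simp [List.count_cons] at hp2
    have hcs1 : cs.count '(' = 0 := by simp [List.count_cons, hc] at hp1 ⊢; omega
    have hcs2 : cs.count ')' = 0 := by simp [List.count_cons, hc2] at hp2 ⊢; omega
    by_cases h1 : c ∈ pvLOW
    · simp [altAux, hc, hc2, h1]
    · by_cases h2 : c ∈ pvHIGH
      · simp only [List.cons_append, altAux, if_neg hc, if_neg hc2, if_neg h1, if_pos h2,
          if_pos rfl]
        exact ih l l' hcs1 hcs2 h (n + 1) _
      · simp only [List.cons_append, altAux, if_neg hc, if_neg hc2, if_neg h1, if_neg h2,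
          if_pos rfl]
        exact ih l l' hcs1 hcs2 h (n + 1) fh

theorem alt_mask : ∀ (pre mid suf : List Char), pre.count '(' = 0 → pre.count ')' = 0 →
    mid.count '(' = mid.count ')' →
    (∀ t ≤ mid.length, (mid.take t).count ')' ≤ (mid.take t).count '(') →
    ∀ (n : Nat) (fh : Option Int),
      altAux (pre ++ '(' :: (mid ++ ')' :: suf)) n 0 fh =
      altAux (pre ++ (List.replicate (mid.length + 2) 'x' ++ suf)) n 0 fh := by

  intro pre mid suf hp1 hp2 hbal hpref n fh
  apply alt_pre_cong pre _ _ hp1 hp2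
  intro n' fh'
  have hopen : ('(' : Char) = '(' := rfl
  simp only [altAux, if_pos hopen]
  rw [alt_skip_depth mid (')' :: suf) (n' + 1) 1 fh' ?cond]
  case cond =>
    intro t ht
    have := hpref t ht
    omega
  have hd : 1 + mid.count '(' - mid.count ')' = 1 := by rw [hbal, Nat.add_sub_cancel]
  rw [hd]
  have hcp : ¬ (')' : Char) = '(' := by decide
  simp only [altAux, if_neg hcp, if_pos rfl]
  rw [alt_skip_x (mid.length + 2) suf n' fh']
  have e1 : n' + 1 + mid.length + 1 = n' + (mid.length + 2) := by omega
  rw [e1]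
  norm_num


theorem maskLoop_eq_of_bb (l : List Char) (op clo : Nat) (hmem : '(' ∈ l)
    (hbb : bbAux l 0 none 0 = some (some op, clo)) :
    maskLoop l = maskLoop ((PySem.List.pyRange (op : Int) (clo : Int)).foldl
      (fun acc _ => maskOnce op clo acc) l) := by
  rw [maskLoop, dif_pos hmem]
  split
  · rename_i hb; rw [hbb] at hb; exact absurd hb (by simp)
  · rename_i x hb; rw [hbb] at hb; simp at hb
  · rename_i op' clo' hb
    rw [hbb] at hb
    injection hb with hb
    injection hb with hb1 hb2
    obtain rfl : op = op' := Option.some.inj hb1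
    obtain rfl : clo = clo' := hb2
    rfl

theorem pre_transfer1 (X1 X2 suf : List Char) (hlen : X1.length = X2.length)
    (hb1 : X1.count '(' = X1.count ')') (hz1 : X2.count '(' = 0) (hz2 : X2.count ')' = 0)
    (h1 : ∀ j < (X1 ++ suf).length, (X1 ++ suf)[j]? = some '(' →
      ((X1 ++ suf).take j).count ')' ≤ ((X1 ++ suf).take j).count '(') :
    ∀ j < (X2 ++ suf).length, (X2 ++ suf)[j]? = some '(' →
      ((X2 ++ suf).take j).count ')' ≤ ((X2 ++ suf).take j).count '(' := by
  intro j hj hjc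
  by_cases hjK : j < X2.length
  · exfalso
    rw [List.getElem?_append_left hjK] at hjc
    have : '(' ∈ X2 := List.mem_of_getElem? hjc
    have hcp : 0 < X2.count '(' := List.count_pos_iff.mpr this
    omega
  · rw [Nat.not_lt] at hjK
    rw [List.getElem?_append_right hjK] at hjc
    have hjK1 : X1.length ≤ j := by omega
    have hj1 : j < (X1 ++ suf).length := by
      simp only [List.length_append] at hj ⊢; omega
    have hjc1 : (X1 ++ suf)[j]? = some '(' := by
      rw [List.getElem?_append_right hjK1, hlen]
      exact hjc
    have := h1 j hj1 hjc1
    rw [List.take_append, List.take_of_length_le hjK1] at this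
    rw [List.take_append, List.take_of_length_le hjK]
    rw [hlen] at this
    simp only [List.count_append] at this ⊢
    omega

theorem pre_transfer2 (X1 X2 suf : List Char) (hlen : X1.length = X2.length)
    (hz1 : X2.count '(' = 0)
    (h2 : ∀ j < (X1 ++ suf).length, (X1 ++ suf)[j]? = some '(' →
      ∃ k < (X1 ++ suf).length, j < k ∧ (X1 ++ suf)[k]? = some ')' ∧
        (((X1 ++ suf).drop (j + 1)).take (k - (j + 1))).count '(' =
          (((X1 ++ suf).drop (j + 1)).take (k - (j + 1))).count ')') :
    ∀ j < (X2 ++ suf).length, (X2 ++ suf)[j]? = some '(' →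
      ∃ k < (X2 ++ suf).length, j < k ∧ (X2 ++ suf)[k]? = some ')' ∧
        (((X2 ++ suf).drop (j + 1)).take (k - (j + 1))).count '(' =
          (((X2 ++ suf).drop (j + 1)).take (k - (j + 1))).count ')' := by
  intro j hj hjc
  by_cases hjK : j < X2.length
  · exfalso
    rw [List.getElem?_append_left hjK] at hjc
    have : '(' ∈ X2 := List.mem_of_getElem? hjc
    have hcp : 0 < X2.count '(' := List.count_pos_iff.mpr this
    omega
  · rw [Nat.not_lt] at hjK
    have hjK1 : X1.length ≤ j := by omega
    have hj1 : j < (X1 ++ suf).length := by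
      simp only [List.length_append] at hj ⊢; omega
    have hjc1 : (X1 ++ suf)[j]? = some '(' := by
      rw [List.getElem?_append_right hjK1, hlen]
      rw [List.getElem?_append_right hjK] at hjc
      exact hjc
    obtain ⟨k, hk, hkj, hkc, hksl⟩ := h2 j hj1 hjc1
    have hkK : X2.length ≤ k := by omega
    have hdropeq : (X2 ++ suf).drop (j + 1) = (X1 ++ suf).drop (j + 1) := by
      have d2 : X2.drop (j + 1) = [] := List.drop_eq_nil_of_le (by omega)
      have d1 : X1.drop (j + 1) = [] := List.drop_eq_nil_of_le (by omega)
      rw [List.drop_append, List.drop_append, d1, d2, hlen]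
    refine ⟨k, by simp only [List.length_append] at hk ⊢; omega, hkj, ?_, ?_⟩
    · rw [List.getElem?_append_right hkK]
      rw [List.getElem?_append_right (by omega : X1.length ≤ k), hlen] at hkc
      exact hkc
    · rw [hdropeq]
      exact hksl

theorem main_equiv : ∀ (N : Nat) (l : List Char), l.count '(' ≤ N →
    (∀ j < l.length, l[j]? = some '(' → (l.take j).count ')' ≤ (l.take j).count '(') →
    (∀ j < l.length, l[j]? = some '(' →
      ∃ k < l.length, j < k ∧ l[k]? = some ')' ∧
        ((l.drop (j + 1)).take (k - (j + 1))).count '(' =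
          ((l.drop (j + 1)).take (k - (j + 1))).count ')') →
    ∃ m, maskLoop l = some m ∧ scanAux m 0 none = altAux l 0 0 none := by

  intro N
  induction N with
  | zero =>
    intro l hcnt h1 h2
    have hnm : '(' ∉ l := by
      intro hmem
      have hpos : 0 < l.count '(' := List.count_pos_iff.mpr hmem
      omega
    refine ⟨l, ?_, (alt_scan l hnm 0 none).symm⟩
    rw [maskLoop]
    simp [hnm]
  | succ N ih =>
    intro l hcnt h1 h2
    by_cases hmem : '(' ∈ l
    · obtain ⟨pre, mid, suf, heq, hp1, hp2, hbal, hpref, hbb⟩ := bb_none l 0 hmem h1 h2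
      simp only [Nat.zero_add] at hbb
      subst heq
      have hfold : (PySem.List.pyRange ((pre.length : Nat) : Int)
            (((pre.length + 1 + mid.length : Nat)) : Int)).foldl
            (fun acc _ => maskOnce pre.length (pre.length + 1 + mid.length) acc)
            (pre ++ '(' :: (mid ++ ')' :: suf))
          = maskOnce pre.length (pre.length + 1 + mid.length)
              (pre ++ '(' :: (mid ++ ')' :: suf)) := by
        rw [PySem.List.pyRange_one_cons
          (by exact_mod_cast (by omega : pre.length < pre.length + 1 + mid.length))]
        exact foldl_apply_idem _ _
          (maskOnce_idem _ _ _ (by simp) (by omega) (by simp; omega)) _ _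
      have hmaskonce : maskOnce pre.length (pre.length + 1 + mid.length)
            (pre ++ '(' :: (mid ++ ')' :: suf))
          = pre ++ (List.replicate (mid.length + 2) 'x' ++ suf) := by
        have ht : (pre ++ '(' :: (mid ++ ')' :: suf)).take pre.length = pre := by
          rw [List.take_append, List.take_of_length_le le_rfl]
          simp
        have hd : (pre ++ '(' :: (mid ++ ')' :: suf)).drop
            (pre.length + 1 + mid.length + 1) = suf := by
          rw [List.drop_append,
            List.drop_eq_nil_of_le (by omega : pre.length ≤ pre.length + 1 + mid.length + 1)]
          simp only [List.nil_append]
          rw [show pre.length + 1 + mid.length + 1 - pre.length = (mid.length + 1) + 1 from by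
            omega]
          rw [List.drop_succ_cons, List.drop_append,
            List.drop_eq_nil_of_le (by omega : mid.length ≤ mid.length + 1)]
          simp
        unfold maskOnce
        rw [ht, hd,
          show pre.length + 1 + mid.length + 1 - pre.length = mid.length + 2 from by omega,
          List.append_assoc]
      have hmask : maskLoop (pre ++ '(' :: (mid ++ ')' :: suf))
          = maskLoop (pre ++ (List.replicate (mid.length + 2) 'x' ++ suf)) := by
        rw [maskLoop_eq_of_bb _ pre.length (pre.length + 1 + mid.length) hmem hbb]
        rw [hfold, hmaskonce]
      have hassocL : pre ++ '(' :: (mid ++ ')' :: suf)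
          = (pre ++ '(' :: (mid ++ [')'])) ++ suf := by simp
      have hassocM : pre ++ (List.replicate (mid.length + 2) 'x' ++ suf)
          = (pre ++ List.replicate (mid.length + 2) 'x') ++ suf := by
        rw [List.append_assoc]
      rw [hassocL] at h1 h2 hcnt
      have hlen12 : (pre ++ '(' :: (mid ++ [')'])).length
          = (pre ++ List.replicate (mid.length + 2) 'x').length := by simp
      have hbX1 : (pre ++ '(' :: (mid ++ [')'])).count '('
          = (pre ++ '(' :: (mid ++ [')'])).count ')' := by
        simp [List.count_append, List.count_cons, hp1, hp2]
        omega
      have hzX2a : (pre ++ List.replicate (mid.length + 2) 'x').count '(' = 0 := by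
        simp [List.count_append, List.count_replicate, hp1]
      have hzX2b : (pre ++ List.replicate (mid.length + 2) 'x').count ')' = 0 := by
        simp [List.count_append, List.count_replicate, hp2]
      have h1m := pre_transfer1 _ _ suf hlen12 hbX1 hzX2a hzX2b h1
      have h2m := pre_transfer2 _ _ suf hlen12 hzX2a h2
      have hcntm : ((pre ++ List.replicate (mid.length + 2) 'x') ++ suf).count '(' ≤ N := by
        simp only [List.count_append, List.count_cons, List.count_replicate] at hcnt ⊢
        simp at hcnt ⊢
        omega
      obtain ⟨r, hr, hsc⟩ := ih ((pre ++ List.replicate (mid.length + 2) 'x') ++ suf)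
        hcntm h1m h2m
      refine ⟨r, ?_, ?_⟩
      · rw [hmask, hassocM]
        exact hr
      · rw [← hassocM] at hsc
        rw [hsc]
        exact (alt_mask pre mid suf hp1 hp2 hbal hpref 0 none).symm
    · refine ⟨l, ?_, (alt_scan l hmem 0 none).symm⟩
      rw [maskLoop]
      simp [hmem]

-- ===== VERDICT (by name: the statement is the Claim_ definition above) =====
theorem find_lowest_val_spec : Claim_equal_find_lowest_val := by
  intro exp _ hpre
  unfold Spec_find_lowest_val find_lowest_val find_lowest_val_alt
  obtain ⟨m, hm, hs⟩ := main_equiv (exp.toList.count '(') exp.toList le_rfl hpre.1 hpre.2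
  rw [hm]
  exact hs
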